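-- pv_equiv track=rewrite | github.com/Finartzi/VaninPostitus | modules/excelohjaus.py | sort_out_more_than_three
-- ===== SOURCE A (Python) =====
-- def sort_out_more_than_three(keep):
--     # Here we find out which indexes they represent
--     def find_out_more_than_three(keep_list, err_list):
--         # in err_list we have starting points, now we look for the other relative points and
--         # add start points to collection
--         nums = set()
--         for tuples in keep_list:
--             if tuples[0] in err_list:
--                 nums.add(tuples[1])
--             if tuples[1] in err_list:
--                 nums.add(tuples[0])
--         for it in err_list:
--             nums.add(it)
--         return list(nums)
--
--     counter = []
--     sorter = set()
--     for item in keep: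
--         counter.append(item[0])
--     for num in counter:
--         x = 0
--         for n in counter:
--             if n == num:
--                 x += 1
--         if x > 2:
--             sorter.add(num)
--     return find_out_more_than_three(keep, sorter)
-- ===== SOURCE B (Python) =====
-- def sort_out_more_than_three(keep):
--     # One pass over keep builds counts of first elements AND a symmetric neighbor
--     # index; the result is then assembled by expanding each hot key (count > 2)
--     # through the index -- keep is never rescanned.
--     counts = {}
--     neighbors = {}
--     for item in keep:
--         a, b = item[0], item[1]
--         counts[a] = counts.get(a, 0) + 1
--         neighbors.setdefault(a, set()).add(b)
--         neighbors.setdefault(b, set()).add(a)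
--     result = set()
--     for v, c in counts.items():
--         if c > 2:
--             result.add(v)
--             result |= neighbors[v]
--     return list(result)
-- ===== Notes on version B (the rewrite author's own statement) =====
-- stated objective: alternative
-- what changed: Replaces A's nested occurrence-counting scans and its rescan of keep with a single pass that builds a dict counter plus a symmetric neighbor index, after which the result is assembled by expanding only the hot keys (count > 2) through that index.
import Mathlib
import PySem

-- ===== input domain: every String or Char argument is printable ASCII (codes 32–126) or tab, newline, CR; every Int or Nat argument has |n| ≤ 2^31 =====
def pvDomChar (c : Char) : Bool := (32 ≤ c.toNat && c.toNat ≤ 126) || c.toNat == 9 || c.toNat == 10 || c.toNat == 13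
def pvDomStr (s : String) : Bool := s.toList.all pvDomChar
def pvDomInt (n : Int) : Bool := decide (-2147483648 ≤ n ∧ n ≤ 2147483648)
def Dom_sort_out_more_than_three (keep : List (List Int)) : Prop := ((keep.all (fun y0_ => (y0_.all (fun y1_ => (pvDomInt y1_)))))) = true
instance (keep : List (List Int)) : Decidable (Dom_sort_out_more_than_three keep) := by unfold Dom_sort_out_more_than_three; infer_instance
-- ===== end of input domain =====

-- B builds a symmetric neighbor index in the same pass as the first-element counts and expands
-- the hot keys through that index, instead of A's nested counting scans plus a rescan of keep;
-- return-value equivalence as a SET: both Pythons return list(<set>), whose iteration order is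
-- CPython hash order and is not modelled, so both ports render that final list(...) canonically
-- as the sorted list of the set's elements (the behavioural comparison of the output is set-based).

-- ===== PORT A =====
def sort_out_more_than_three (keep : List (List Int)) : List Int :=
  -- counter = [item[0] for item in keep] built by append
  let counter : List Int := keep.foldl (fun c item => c ++ [PySem.List.pyGetD item 0 0]) []
  -- sorter: for each num in counter, count occurrences by an inner scan; add if > 2
  let sorter : PySem.Set Int := counter.foldl (fun s num =>
      let x : Int := counter.foldl (fun x n => if n == num then x + 1 else x) 0
      if x > 2 then PySem.Set.add s num else s) PySem.Set.empty
  -- find_out_more_than_three keep sorter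
  let nums : PySem.Set Int := keep.foldl (fun nums tuples =>
      let nums := if PySem.Set.contains sorter (PySem.List.pyGetD tuples 0 0) then
          PySem.Set.add nums (PySem.List.pyGetD tuples 1 0) else nums
      if PySem.Set.contains sorter (PySem.List.pyGetD tuples 1 0) then
          PySem.Set.add nums (PySem.List.pyGetD tuples 0 0) else nums) PySem.Set.empty
  let nums : PySem.Set Int := sorter.foldl (fun nums it => PySem.Set.add nums it) nums
  -- list(nums): hash iteration order unmodelled; canonical sorted rendering (output compared as a set)
  PySem.List.sorted nums (fun x => x) false

-- ===== PORT B =====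
def sort_out_more_than_three_alt (keep : List (List Int)) : List Int :=
  -- one pass: counts[a] = counts.get(a,0)+1; neighbors.setdefault(a,set()).add(b); symmetric for b
  let st : PySem.Dict Int Int × PySem.Dict Int (PySem.Set Int) := keep.foldl
      (fun st item =>
        let a := PySem.List.pyGetD item 0 0
        let b := PySem.List.pyGetD item 1 0
        let counts := st.1.modify a 0 (fun v => v + 1)
        let nb := st.2.modify a PySem.Set.empty (fun s => PySem.Set.add s b)
        let nb := nb.modify b PySem.Set.empty (fun s => PySem.Set.add s a)
        (counts, nb))
      (PySem.Dict.empty, PySem.Dict.empty)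
  -- for v, c in counts.items(): if c > 2: result.add(v); result |= neighbors[v]
  -- (every counts key is a neighbors key, so neighbors[v] never raises; getD renders the lookup)
  let result : PySem.Set Int := st.1.items.foldl
      (fun r vc =>
        if vc.2 > 2 then PySem.Set.update (PySem.Set.add r vc.1) (st.2.getD vc.1 PySem.Set.empty)
        else r)
      PySem.Set.empty
  -- list(result): canonical sorted rendering, as in port A
  PySem.List.sorted result (fun x => x) false

-- ===== PRECONDITION & SPEC =====
-- Pre_ excludes exactly the inputs on which Python A raises IndexError: an inner list
-- with fewer than two elements (item[0] / item[1] are read for every element of keep).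
def Pre_sort_out_more_than_three (keep : List (List Int)) : Prop :=
  ∀ l ∈ keep, 2 ≤ l.length
instance (keep : List (List Int)) : Decidable (Pre_sort_out_more_than_three keep) := by
  unfold Pre_sort_out_more_than_three; infer_instance

def pvWitness_sort_out_more_than_three : List (List Int) := [[1, 2], [1, 3], [1, 4], [7, 8]]

def Spec_sort_out_more_than_three (keep : List (List Int)) (out : List Int) : Prop := out = sort_out_more_than_three_alt keep
instance (keep : List (List Int)) (out : List Int) : Decidable (Spec_sort_out_more_than_three keep out) := by unfold Spec_sort_out_more_than_three; infer_instance

-- ===== CLAIM (what is proved, stated in full; the proofs are below) =====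
def Claim_equal_sort_out_more_than_three : Prop := ∀ (keep : List (List Int)), Dom_sort_out_more_than_three keep → Pre_sort_out_more_than_three keep → Spec_sort_out_more_than_three keep (sort_out_more_than_three keep)

-- ===== LEMMAS AND PROOFS =====

-- item[0] / item[1] as total reads (the ports read them with pyGetD)
def pvF (it : List Int) : Int := PySem.List.pyGetD it 0 0
def pvS (it : List Int) : Int := PySem.List.pyGetD it 1 0

lemma pvF_eq (it : List Int) : PySem.List.pyGetD it 0 0 = pvF it := rfl
lemma pvS_eq (it : List Int) : PySem.List.pyGetD it 1 0 = pvS it := rfl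

-- A's inner counting loop computes List.count
lemma inner_count (cl : List Int) (num : Int) :
    cl.foldl (fun x n => if n == num then x + 1 else x) (0 : Int) = (cl.count num : Int) := by
  have := PySem.List.foldl_count_if (fun n => n == num) cl 0
  simpa [List.count] using this

-- membership / nodup through a conditional-add fold (A's sorter loop)
lemma mem_foldl_condAdd (p : Int → Prop) [DecidablePred p] (l : List Int) :
    ∀ (s : PySem.Set Int) (y : Int),
      (y ∈ l.foldl (fun s num => if p num then PySem.Set.add s num else s) s) ↔
        (y ∈ s ∨ (y ∈ l ∧ p y)) := by
  induction l with
  | nil => intro s y; simp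
  | cons a t ih =>
    intro s y
    simp only [List.foldl_cons]
    by_cases hp : p a
    · rw [if_pos hp, ih]
      simp only [PySem.Set.mem_add, List.mem_cons]
      constructor
      · rintro ((h | rfl) | ⟨h1, h2⟩)
        · exact Or.inl h
        · exact Or.inr ⟨Or.inl rfl, hp⟩
        · exact Or.inr ⟨Or.inr h1, h2⟩
      · rintro (h | ⟨(rfl | h1), h2⟩)
        · exact Or.inl (Or.inl h)
        · exact Or.inl (Or.inr rfl)
        · exact Or.inr ⟨h1, h2⟩
    · rw [if_neg hp, ih]
      simp only [List.mem_cons]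
      constructor
      · rintro (h | ⟨h1, h2⟩)
        · exact Or.inl h
        · exact Or.inr ⟨Or.inr h1, h2⟩
      · rintro (h | ⟨(rfl | h1), h2⟩)
        · exact Or.inl h
        · exact absurd h2 hp
        · exact Or.inr ⟨h1, h2⟩

-- membership / nodup through A's partner-collecting fold over keep
lemma mem_foldl_pairAdd (hot : Int → Bool) (l : List (List Int)) :
    ∀ (s : PySem.Set Int) (y : Int),
      (y ∈ l.foldl (fun nums tuples =>
          if hot (pvS tuples) then
            PySem.Set.add (if hot (pvF tuples) then PySem.Set.add nums (pvS tuples) else nums) (pvF tuples)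
          else (if hot (pvF tuples) then PySem.Set.add nums (pvS tuples) else nums)) s) ↔
        (y ∈ s ∨ ∃ it ∈ l, (hot (pvF it) = true ∧ y = pvS it) ∨ (hot (pvS it) = true ∧ y = pvF it)) := by
  induction l with
  | nil => intro s y; simp
  | cons a t ih =>
    intro s y
    simp only [List.foldl_cons, List.mem_cons]
    rw [ih]
    by_cases h0 : hot (pvF a) = true <;> by_cases h1 : hot (pvS a) = true <;>
      simp only [h0, h1, if_pos, if_neg, Bool.not_eq_true, PySem.Set.mem_add] <;>
      constructor
    · rintro (((h | rfl) | rfl) | ⟨it, hit, hcase⟩)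
      · exact Or.inl h
      · exact Or.inr ⟨a, Or.inl rfl, Or.inl ⟨h0, rfl⟩⟩
      · exact Or.inr ⟨a, Or.inl rfl, Or.inr ⟨h1, rfl⟩⟩
      · exact Or.inr ⟨it, Or.inr hit, hcase⟩
    · rintro (h | ⟨it, (rfl | hit), hcase⟩)
      · exact Or.inl (Or.inl (Or.inl h))
      · rcases hcase with ⟨_, rfl⟩ | ⟨_, rfl⟩
        · exact Or.inl (Or.inl (Or.inr rfl))
        · exact Or.inl (Or.inr rfl)
      · exact Or.inr ⟨it, hit, hcase⟩
    · rintro ((h | rfl) | ⟨it, hit, hcase⟩)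
      · exact Or.inl h
      · exact Or.inr ⟨a, Or.inl rfl, Or.inl ⟨h0, rfl⟩⟩
      · exact Or.inr ⟨it, Or.inr hit, hcase⟩
    · rintro (h | ⟨it, (rfl | hit), hcase⟩)
      · exact Or.inl (Or.inl h)
      · rcases hcase with ⟨_, rfl⟩ | ⟨hh, rfl⟩
        · exact Or.inl (Or.inr rfl)
        · exact absurd hh (by simp [h1])
      · exact Or.inr ⟨it, hit, hcase⟩
    · rintro ((h | rfl) | ⟨it, hit, hcase⟩)
      · exact Or.inl h
      · exact Or.inr ⟨a, Or.inl rfl, Or.inr ⟨h1, rfl⟩⟩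
      · exact Or.inr ⟨it, Or.inr hit, hcase⟩
    · rintro (h | ⟨it, (rfl | hit), hcase⟩)
      · exact Or.inl (Or.inl h)
      · rcases hcase with ⟨hh, rfl⟩ | ⟨_, rfl⟩
        · exact absurd hh (by simp [h0])
        · exact Or.inl (Or.inr rfl)
      · exact Or.inr ⟨it, hit, hcase⟩
    · rintro (h | ⟨it, hit, hcase⟩)
      · exact Or.inl h
      · exact Or.inr ⟨it, Or.inr hit, hcase⟩
    · rintro (h | ⟨it, (rfl | hit), hcase⟩)
      · exact Or.inl h
      · rcases hcase with ⟨hh, rfl⟩ | ⟨hh, rfl⟩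
        · exact absurd hh (by simp [h0])
        · exact absurd hh (by simp [h1])
      · exact Or.inr ⟨it, hit, hcase⟩

lemma nodup_foldl_pairAdd (hot : Int → Bool) (l : List (List Int)) :
    ∀ (s : PySem.Set Int), s.Nodup →
      (l.foldl (fun nums tuples =>
          if hot (pvS tuples) then
            PySem.Set.add (if hot (pvF tuples) then PySem.Set.add nums (pvS tuples) else nums) (pvF tuples)
          else (if hot (pvF tuples) then PySem.Set.add nums (pvS tuples) else nums)) s).Nodup := by
  induction l with
  | nil => intro s h; exact h
  | cons a t ih =>
    intro s h
    simp only [List.foldl_cons]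
    apply ih
    split
    · split
      · exact PySem.Set.nodup_add _ _ (PySem.Set.nodup_add _ _ h)
      · exact PySem.Set.nodup_add _ _ h
    · split
      · exact PySem.Set.nodup_add _ _ h
      · exact h

-- membership / nodup through a plain add fold (A's final 'for it in err_list' loop)
lemma mem_foldl_add' (l : List Int) :
    ∀ (s : PySem.Set Int) (y : Int),
      (y ∈ l.foldl (fun nums it => PySem.Set.add nums it) s) ↔ (y ∈ s ∨ y ∈ l) := by
  induction l with
  | nil => intro s y; simp
  | cons a t ih =>
    intro s y
    simp only [List.foldl_cons, List.mem_cons]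
    rw [ih]
    simp only [PySem.Set.mem_add]
    tauto

lemma nodup_foldl_add' (l : List Int) :
    ∀ (s : PySem.Set Int), s.Nodup →
      (l.foldl (fun nums it => PySem.Set.add nums it) s).Nodup := by
  induction l with
  | nil => intro s h; exact h
  | cons a t ih =>
    intro s h
    exact ih _ (PySem.Set.nodup_add s a h)

-- B's pair-state fold splits into its two component folds
lemma fold_pair (l : List (List Int)) :
    ∀ (c : PySem.Dict Int Int) (n : PySem.Dict Int (PySem.Set Int)),
      l.foldl (fun st item =>
          (st.1.modify (pvF item) 0 (fun v => v + 1),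
           (st.2.modify (pvF item) PySem.Set.empty (fun s => PySem.Set.add s (pvS item))).modify
             (pvS item) PySem.Set.empty (fun s => PySem.Set.add s (pvF item)))) (c, n)
        = (l.foldl (fun d item => d.modify (pvF item) 0 (fun v => v + 1)) c,
           l.foldl (fun d item =>
             (d.modify (pvF item) PySem.Set.empty (fun s => PySem.Set.add s (pvS item))).modify
               (pvS item) PySem.Set.empty (fun s => PySem.Set.add s (pvF item))) n) := by
  induction l with
  | nil => intro c n; rfl
  | cons a t ih => intro c n; simp only [List.foldl_cons]; exact ih _ _

-- B's counts loop is Counter(firsts)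
lemma counts_eq_counter (l : List (List Int)) :
    l.foldl (fun d item => d.modify (pvF item) 0 (fun v => v + 1)) PySem.Dict.empty
      = PySem.Dict.counter (l.map pvF) := by
  rw [PySem.Dict.counter_eq_foldl, List.foldl_map]

-- one step of B's neighbor-index construction, seen through getD
lemma mem_nb_step (d : PySem.Dict Int (PySem.Set Int)) (a b v y : Int) :
    (y ∈ ((d.modify a PySem.Set.empty (fun s => PySem.Set.add s b)).modify b PySem.Set.empty
        (fun s => PySem.Set.add s a)).getD v PySem.Set.empty) ↔
      (y ∈ d.getD v PySem.Set.empty ∨ (v = a ∧ y = b) ∨ (v = b ∧ y = a)) := by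
  rw [PySem.Dict.getD_modify]
  by_cases hvb : v = b
  · subst hvb
    rw [if_pos rfl, PySem.Set.mem_add, PySem.Dict.getD_modify]
    by_cases hva : v = a
    · subst hva
      rw [if_pos rfl, PySem.Set.mem_add]
      tauto
    · rw [if_neg hva]
      tauto
  · rw [if_neg hvb, PySem.Dict.getD_modify]
    by_cases hva : v = a
    · subst hva
      rw [if_pos rfl, PySem.Set.mem_add]
      tauto
    · rw [if_neg hva]
      tauto

-- the neighbor index contains exactly the pair partners
lemma mem_nb (l : List (List Int)) :
    ∀ (d : PySem.Dict Int (PySem.Set Int)) (v y : Int),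
      (y ∈ (l.foldl (fun d item =>
          (d.modify (pvF item) PySem.Set.empty (fun s => PySem.Set.add s (pvS item))).modify
            (pvS item) PySem.Set.empty (fun s => PySem.Set.add s (pvF item))) d).getD v PySem.Set.empty) ↔
        (y ∈ d.getD v PySem.Set.empty ∨
          ∃ it ∈ l, (pvF it = v ∧ y = pvS it) ∨ (pvS it = v ∧ y = pvF it)) := by
  induction l with
  | nil => intro d v y; simp
  | cons a t ih =>
    intro d v y
    simp only [List.foldl_cons, List.mem_cons]
    rw [ih, mem_nb_step]
    constructor
    · rintro ((h | ⟨rfl, rfl⟩ | ⟨rfl, rfl⟩) | ⟨it, hit, hc⟩)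
      · exact Or.inl h
      · exact Or.inr ⟨a, Or.inl rfl, Or.inl ⟨rfl, rfl⟩⟩
      · exact Or.inr ⟨a, Or.inl rfl, Or.inr ⟨rfl, rfl⟩⟩
      · exact Or.inr ⟨it, Or.inr hit, hc⟩
    · rintro (h | ⟨it, (rfl | hit), hc⟩)
      · exact Or.inl (Or.inl h)
      · rcases hc with ⟨rfl, rfl⟩ | ⟨rfl, rfl⟩
        · exact Or.inl (Or.inr (Or.inl ⟨rfl, rfl⟩))
        · exact Or.inl (Or.inr (Or.inr ⟨rfl, rfl⟩))
      · exact Or.inr ⟨it, hit, hc⟩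

-- membership / nodup through B's result-assembly loop over counts.items()
lemma mem_result_fold (nb : PySem.Dict Int (PySem.Set Int)) (items : List (Int × Int)) :
    ∀ (r : PySem.Set Int) (y : Int),
      (y ∈ items.foldl (fun r vc =>
          if vc.2 > 2 then PySem.Set.update (PySem.Set.add r vc.1) (nb.getD vc.1 PySem.Set.empty) else r) r) ↔
        (y ∈ r ∨ ∃ vc ∈ items, vc.2 > 2 ∧ (y = vc.1 ∨ y ∈ nb.getD vc.1 PySem.Set.empty)) := by
  induction items with
  | nil => intro r y; simp
  | cons a t ih =>
    intro r y
    simp only [List.foldl_cons, List.mem_cons]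
    rw [ih]
    by_cases h : a.2 > 2
    · rw [if_pos h]
      simp only [PySem.Set.mem_update, PySem.Set.mem_add]
      constructor
      · rintro (((hr | rfl) | hg) | ⟨vc, hvc, hc⟩)
        · exact Or.inl hr
        · exact Or.inr ⟨a, Or.inl rfl, h, Or.inl rfl⟩
        · exact Or.inr ⟨a, Or.inl rfl, h, Or.inr hg⟩
        · exact Or.inr ⟨vc, Or.inr hvc, hc⟩
      · rintro (hr | ⟨vc, (rfl | hvc), h2, hc⟩)
        · exact Or.inl (Or.inl (Or.inl hr))
        · rcases hc with rfl | hg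
          · exact Or.inl (Or.inl (Or.inr rfl))
          · exact Or.inl (Or.inr hg)
        · exact Or.inr ⟨vc, hvc, h2, hc⟩
    · rw [if_neg h]
      constructor
      · rintro (hr | ⟨vc, hvc, hc⟩)
        · exact Or.inl hr
        · exact Or.inr ⟨vc, Or.inr hvc, hc⟩
      · rintro (hr | ⟨vc, (rfl | hvc), h2, hc⟩)
        · exact Or.inl hr
        · exact absurd h2 h
        · exact Or.inr ⟨vc, hvc, h2, hc⟩

lemma nodup_update' (s : PySem.Set Int) (xs : List Int) (h : s.Nodup) :
    (PySem.Set.update s xs).Nodup := by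
  show (xs.foldl PySem.Set.add s).Nodup
  induction xs generalizing s with
  | nil => exact h
  | cons a t ih => exact ih _ (PySem.Set.nodup_add s a h)

lemma nodup_result_fold (nb : PySem.Dict Int (PySem.Set Int)) (items : List (Int × Int)) :
    ∀ (r : PySem.Set Int), r.Nodup →
      (items.foldl (fun r vc =>
          if vc.2 > 2 then PySem.Set.update (PySem.Set.add r vc.1) (nb.getD vc.1 PySem.Set.empty) else r) r).Nodup := by
  induction items with
  | nil => intro r h; exact h
  | cons a t ih =>
    intro r h
    simp only [List.foldl_cons]
    apply ih
    split
    · exact nodup_update' _ _ (PySem.Set.nodup_add r a.1 h)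
    · exact h

-- ===== VERDICT (by name: the statement is the Claim_ definition above) =====
theorem sort_out_more_than_three_spec : Claim_equal_sort_out_more_than_three := by
  intro keep _ _
  unfold Spec_sort_out_more_than_three sort_out_more_than_three sort_out_more_than_three_alt
  simp only [PySem.List.foldl_append_singleton_eq_map, List.nil_append, inner_count,
    pvF_eq, pvS_eq]
  rw [fold_pair]
  dsimp only
  rw [counts_eq_counter, PySem.Dict.items_counter]
  rw [PySem.List.sorted_id_eq_sorted_id_iff_perm]
  refine ((List.perm_ext_iff_of_nodup ?_ ?_).mpr ?_)
  · exact nodup_foldl_add' _ _ (nodup_foldl_pairAdd _ _ _ List.nodup_nil)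
  · exact nodup_result_fold _ _ _ List.nodup_nil
  intro y
  rw [mem_foldl_add', mem_foldl_pairAdd, mem_result_fold]
  simp only [mem_nb, PySem.Set.contains_iff, mem_foldl_condAdd, PySem.Dict.getD_empty,
    PySem.Set.mem_ofList, List.mem_map]
  simp only [PySem.Set.empty, List.not_mem_nil, false_or]
  constructor
  · rintro (⟨it, hit, ⟨⟨hf, hc⟩, rfl⟩ | ⟨⟨hf, hc⟩, rfl⟩⟩ | ⟨hf, hc⟩)
    · exact ⟨(pvF it, _), ⟨pvF it, hf, rfl⟩, hc, Or.inr ⟨it, hit, Or.inl ⟨rfl, rfl⟩⟩⟩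
    · exact ⟨(pvS it, _), ⟨pvS it, hf, rfl⟩, hc, Or.inr ⟨it, hit, Or.inr ⟨rfl, rfl⟩⟩⟩
    · exact ⟨(y, _), ⟨y, hf, rfl⟩, hc, Or.inl rfl⟩
  · rintro ⟨vc, ⟨a, ha, rfl⟩, hc2, rfl | ⟨it, hit, ⟨hfa, rfl⟩ | ⟨hsa, rfl⟩⟩⟩
    · exact Or.inr ⟨ha, hc2⟩
    · subst hfa
      exact Or.inl ⟨it, hit, Or.inl ⟨⟨ha, hc2⟩, rfl⟩⟩
    · subst hsa
      exact Or.inl ⟨it, hit, Or.inr ⟨⟨ha, hc2⟩, rfl⟩⟩
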